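-- pv_equiv track=rewrite | github.com/ankul-in/Two-years | KATA380.py | solve
-- ===== SOURCE A (Python) =====
-- def solve(arr):
--     answer = []
--     for i,j in enumerate(arr):
--         flag=False
--         for k in arr[i:]:
--             if j<k:
--                 flag=True
--         if flag == True:
--             pass
--         else:
--             if j not in answer:
--                 answer.append(j)
--     return answer
-- ===== SOURCE B (Python) =====
-- def solve(arr):
--     # Single right-to-left pass with a running maximum, then dedup with a set.
--     kept = []
--     m = None
--     for j in reversed(arr):
--         if m is None or m <= j:
--             kept.append(j)
--         m = j if m is None else max(m, j)
--     seen = set()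
--     answer = []
--     for j in reversed(kept):
--         if j not in seen:
--             seen.add(j)
--             answer.append(j)
--     return answer
-- ===== Notes on version B (the rewrite author's own statement) =====
-- stated objective: faster
-- what changed: Replaces the quadratic inner scan of each suffix (and the list-membership dedup) by one right-to-left pass maintaining the running suffix maximum, followed by a set-based dedup pass.
import Mathlib
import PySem

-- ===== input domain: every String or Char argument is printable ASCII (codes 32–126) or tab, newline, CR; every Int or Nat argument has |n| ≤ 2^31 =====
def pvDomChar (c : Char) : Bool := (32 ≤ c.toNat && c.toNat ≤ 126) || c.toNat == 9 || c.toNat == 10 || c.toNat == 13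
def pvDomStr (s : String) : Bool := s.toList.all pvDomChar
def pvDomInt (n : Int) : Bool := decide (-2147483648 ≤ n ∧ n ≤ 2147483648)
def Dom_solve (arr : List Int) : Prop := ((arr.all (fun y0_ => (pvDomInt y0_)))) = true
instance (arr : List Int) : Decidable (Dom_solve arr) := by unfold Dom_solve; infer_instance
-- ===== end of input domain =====

-- B replaces A's quadratic per-element suffix scan by one right-to-left running-maximum
-- pass plus a set-based dedup pass (measured faster, asymptotic change).

-- ===== PORT A =====
def solve (arr : List Int) : List Int :=
  (PySem.List.enumerate arr).foldl (fun answer ij =>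
    if ((PySem.List.slice arr (some ij.1) none).foldl
          (fun f k => if ij.2 < k then true else f) false) = true then answer
    else if ij.2 ∈ answer then answer else answer ++ [ij.2]) []

-- ===== PORT B =====
def solve_alt (arr : List Int) : List Int :=
  let st := arr.reverse.foldl (fun (st : List Int × Option Int) j =>
      let kept' := match st.2 with
        | none => st.1 ++ [j]
        | some v => if v ≤ j then st.1 ++ [j] else st.1
      let m' := match st.2 with
        | none => some j
        | some v => some (max v j)
      (kept', m')) ([], none)
  (st.1.reverse.foldl (fun (p : PySem.Set Int × List Int) j =>
      if PySem.Set.contains p.1 j then p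
      else (PySem.Set.add p.1 j, p.2 ++ [j])) (PySem.Set.empty, [])).2

-- ===== PRECONDITION & SPEC =====
def Spec_solve (arr : List Int) (out : List Int) : Prop := out = solve_alt arr
instance (arr : List Int) (out : List Int) : Decidable (Spec_solve arr out) := by unfold Spec_solve; infer_instance

-- ===== CLAIM (what is proved, stated in full; the proofs are below) =====
def Claim_equal_solve : Prop := ∀ (arr : List Int), Dom_solve arr → Spec_solve arr (solve arr)

-- ===== LEMMAS AND PROOFS =====

/-- Elements of `xs` having no strictly greater element at or after them. -/
def keepL : List Int → List Int
  | [] => []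
  | x :: xs => if xs.all (fun k => decide (k ≤ x)) then x :: keepL xs else keepL xs

def maxOpt : List Int → Option Int
  | [] => none
  | x :: xs => match maxOpt xs with
      | none => some x
      | some v => some (max v x)

theorem maxOpt_eq_none (xs : List Int) : maxOpt xs = none ↔ xs = [] := by
  cases xs with
  | nil => simp [maxOpt]
  | cons y ys => simp only [maxOpt]; cases maxOpt ys <;> simp

theorem maxOpt_some_le (xs : List Int) (v x : Int) (h : maxOpt xs = some v) :
    v ≤ x ↔ ∀ k ∈ xs, k ≤ x := by
  induction xs generalizing v with
  | nil => simp [maxOpt] at h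
  | cons y ys ih =>
    simp only [maxOpt] at h
    cases hm : maxOpt ys with
    | none =>
      rw [hm] at h
      cases h
      have he : ys = [] := (maxOpt_eq_none ys).mp hm
      subst he; simp
    | some w =>
      rw [hm] at h
      cases h
      rw [max_le_iff, List.forall_mem_cons, ← ih w hm, and_comm]

theorem flag_eq (j : Int) (xs : List Int) (b : Bool) :
    xs.foldl (fun f k => if j < k then true else f) b
      = (b || xs.any (fun k => decide (j < k))) := by
  induction xs generalizing b with
  | nil => simp
  | cons x xs ih =>
    rw [List.foldl_cons, ih]
    by_cases h : j < x <;> simp [h]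

/-- A's outer loop over a suffix of `arr` equals the naive dedup fold over `keepL` of it. -/
theorem solveA_loop (arr : List Int) (xs : List Int) (s : Nat) (acc : List Int)
    (h : arr.drop s = xs) :
    (PySem.List.enumerate xs (s : Int)).foldl (fun answer ij =>
        if ((PySem.List.slice arr (some ij.1) none).foldl
              (fun f k => if ij.2 < k then true else f) false) = true then answer
        else if ij.2 ∈ answer then answer else answer ++ [ij.2]) acc
      = (keepL xs).foldl (fun ans j => if j ∈ ans then ans else ans ++ [j]) acc := by
  induction xs generalizing s acc with
  | nil => simp [keepL]
  | cons x xs ih =>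
    rw [PySem.List.enumerate_cons, List.foldl_cons]
    have hslice : PySem.List.slice arr (some (s : Int)) none = x :: xs := by
      rw [PySem.List.slice_from_natCast, h]
    have hnext : arr.drop (s + 1) = xs := by
      rw [← List.tail_drop, h]; rfl
    have hstep : ((s : Int) + 1) = ((s + 1 : Nat) : Int) := by omega
    rw [hslice, hstep, ih (s + 1) _ hnext]
    rw [flag_eq]
    by_cases hc : xs.all (fun k => decide (k ≤ x)) = true
    · have hany : ((x :: xs).any fun k => decide (x < k)) = false := by
        simp only [List.all_eq_true, decide_eq_true_eq] at hc
        simp only [List.any_eq_false, decide_eq_true_eq, not_lt, List.mem_cons]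
        rintro k (rfl | hk)
        · exact le_refl k
        · exact hc k hk
      simp only [hany, Bool.false_or, keepL, hc, if_true, Bool.false_eq_true, if_false,
        List.foldl_cons]
    · have hany : ((x :: xs).any fun k => decide (x < k)) = true := by
        simp only [List.all_eq_true, decide_eq_true_eq, not_forall] at hc
        obtain ⟨k, hk, hkx⟩ := hc
        simp only [List.any_eq_true, decide_eq_true_eq]
        exact ⟨k, List.mem_cons_of_mem _ hk, by omega⟩
      simp only [hany, Bool.false_or, keepL, hc, if_true, if_false, Bool.false_eq_true]

/-- B's first loop (as a foldr over `arr`) computes `keepL` reversed, plus the running maximum. -/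
theorem solveB_loop (arr : List Int) :
    arr.foldr (fun j (st : List Int × Option Int) =>
        let kept' := match st.2 with
          | none => st.1 ++ [j]
          | some v => if v ≤ j then st.1 ++ [j] else st.1
        let m' := match st.2 with
          | none => some j
          | some v => some (max v j)
        (kept', m')) ([], none)
      = ((keepL arr).reverse, maxOpt arr) := by
  induction arr with
  | nil => simp [keepL, maxOpt]
  | cons x xs ih =>
    rw [List.foldr_cons, ih]
    cases hm : maxOpt xs with
    | none =>
      have he : xs = [] := (maxOpt_eq_none xs).mp hm
      subst he
      simp [keepL, maxOpt]
    | some v =>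
      by_cases hv : v ≤ x
      · have hc : xs.all (fun k => decide (k ≤ x)) = true := by
          simp only [List.all_eq_true, decide_eq_true_eq]
          exact fun k hk => ((maxOpt_some_le xs v x hm).mp hv) k hk
        simp [keepL, maxOpt, hm, hv, hc]
      · have hc : xs.all (fun k => decide (k ≤ x)) = false := by
          rw [Bool.eq_false_iff]
          intro hall
          apply hv
          rw [maxOpt_some_le xs v x hm]
          simpa using hall
        simp [keepL, maxOpt, hm, hv, hc]

/-- The set-based dedup fold equals the list-membership dedup fold, given the invariant. -/
theorem dedup_eq (l : List Int) (seen : PySem.Set Int) (ans : List Int)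
    (hinv : ∀ x : Int, x ∈ seen ↔ x ∈ ans) :
    (l.foldl (fun (p : PySem.Set Int × List Int) j =>
        if PySem.Set.contains p.1 j then p
        else (PySem.Set.add p.1 j, p.2 ++ [j])) (seen, ans)).2
      = l.foldl (fun ans j => if j ∈ ans then ans else ans ++ [j]) ans := by
  induction l generalizing seen ans with
  | nil => rfl
  | cons x xs ih =>
    simp only [List.foldl_cons]
    by_cases hx : x ∈ ans
    · have hc : PySem.Set.contains seen x = true := by
        rw [PySem.Set.contains_iff, hinv]; exact hx
      simp only [hc, if_true, if_pos hx]
      exact ih seen ans hinv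
    · have hc : ¬ PySem.Set.contains seen x = true := by
        rw [PySem.Set.contains_iff, hinv]; exact hx
      simp only [hc, if_neg hx, if_false, Bool.false_eq_true]
      refine ih _ _ ?_
      intro y
      rw [PySem.Set.mem_add, hinv]
      simp [or_comm]

-- ===== VERDICT (by name: the statement is the Claim_ definition above) =====
theorem solve_spec : Claim_equal_solve := by
  intro arr _
  unfold Spec_solve solve solve_alt
  rw [List.foldl_reverse]
  have hA := solveA_loop arr arr 0 [] rfl
  simp only [Nat.cast_zero] at hA
  rw [hA, solveB_loop]
  simp only [List.reverse_reverse]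
  rw [dedup_eq (keepL arr) PySem.Set.empty [] (by intro x; simp [PySem.Set.empty])]
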